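-- pv_equiv track=rewrite | github.com/NDGopher/KalshiLiveNEW | odds_ev_monitor.py | _market_names_match
-- ===== SOURCE A (Python) =====
-- def _market_names_match(a: str, b: str) -> bool:
--     a_u = (a or "").upper().replace(" ", "")
--     b_u = (b or "").upper().replace(" ", "")
--     if a_u == b_u:
--         return True
--     aliases = (
--         ("ML", "MONEYLINE", "MONEY"),
--         ("SPREAD", "HANDICAP", "ASIANHANDICAP"),
--         ("TOTAL", "TOTALS", "OVER/UNDER", "OU"),
--     )
--     for group in aliases:
--         if a_u in group and b_u in group:
--             return True
--     return False
-- ===== SOURCE B (Python) =====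
-- def _canonical(name: str) -> str:
--     """Rewrite a market name to its canonical form."""
--     u = (name or "").upper().replace(" ", "")
--     if u == "MONEYLINE" or u == "MONEY":
--         return "ML"
--     if u == "HANDICAP" or u == "ASIANHANDICAP":
--         return "SPREAD"
--     if u == "TOTALS" or u == "OVER/UNDER" or u == "OU":
--         return "TOTAL"
--     return u
--
--
-- def _market_names_match(a: str, b: str) -> bool:
--     return _canonical(a) == _canonical(b)
-- ===== Notes on version B (the rewrite author's own statement) =====
-- stated objective: simpler
-- what changed: B maps each name independently to a canonical form via a chain of rewrites and compares the two canonical forms, replacing A's equality early-return plus per-pair loop over alias groups testing double membership.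
import Mathlib
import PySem

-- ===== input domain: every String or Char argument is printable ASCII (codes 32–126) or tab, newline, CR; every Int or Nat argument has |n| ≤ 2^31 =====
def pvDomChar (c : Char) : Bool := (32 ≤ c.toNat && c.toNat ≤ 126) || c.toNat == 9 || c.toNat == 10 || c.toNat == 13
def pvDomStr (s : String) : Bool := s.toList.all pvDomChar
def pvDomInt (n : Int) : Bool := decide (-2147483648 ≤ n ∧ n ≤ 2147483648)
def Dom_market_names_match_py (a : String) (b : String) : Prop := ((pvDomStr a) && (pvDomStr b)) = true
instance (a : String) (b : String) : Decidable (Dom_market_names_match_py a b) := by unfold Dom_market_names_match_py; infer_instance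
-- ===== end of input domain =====

-- B canonicalises each name independently (rewrite chain) and compares the canonical forms,
-- instead of A's equality early-return plus per-pair scan of alias groups (objective: simpler).

-- ===== PORT A =====
def pvAliases : List (List String) :=
  [["ML", "MONEYLINE", "MONEY"],
   ["SPREAD", "HANDICAP", "ASIANHANDICAP"],
   ["TOTAL", "TOTALS", "OVER/UNDER", "OU"]]

def pvAliasLoop (au bu : String) : List (List String) → Bool
  | [] => false
  | g :: gs => if g.contains au && g.contains bu then true else pvAliasLoop au bu gs

def market_names_match_py (a : String) (b : String) : Bool :=
  let a_u := PySem.Str.replace (PySem.Str.upper a) " " ""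
  let b_u := PySem.Str.replace (PySem.Str.upper b) " " ""
  if a_u == b_u then true
  else pvAliasLoop a_u b_u pvAliases

-- ===== PORT B =====
def pvCanonical (name : String) : String :=
  let u := PySem.Str.replace (PySem.Str.upper name) " " ""
  if u == "MONEYLINE" || u == "MONEY" then "ML"
  else if u == "HANDICAP" || u == "ASIANHANDICAP" then "SPREAD"
  else if u == "TOTALS" || u == "OVER/UNDER" || u == "OU" then "TOTAL"
  else u

def market_names_match_py_alt (a : String) (b : String) : Bool :=
  pvCanonical a == pvCanonical b

-- ===== PRECONDITION & SPEC =====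
def Spec_market_names_match_py (a : String) (b : String) (out : Bool) : Prop := out = market_names_match_py_alt a b
instance (a : String) (b : String) (out : Bool) : Decidable (Spec_market_names_match_py a b out) := by unfold Spec_market_names_match_py; infer_instance

-- ===== CLAIM (what is proved, stated in full; the proofs are below) =====
def Claim_equal_market_names_match_py : Prop := ∀ (a : String) (b : String), Dom_market_names_match_py a b → Spec_market_names_match_py a b (market_names_match_py a b)

-- ===== LEMMAS AND PROOFS =====

-- the rewrite chain of pvCanonical, acting on an already-normalised string
def pvChain (u : String) : String :=
  if u == "MONEYLINE" || u == "MONEY" then "ML"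
  else if u == "HANDICAP" || u == "ASIANHANDICAP" then "SPREAD"
  else if u == "TOTALS" || u == "OVER/UNDER" || u == "OU" then "TOTAL"
  else u

lemma pvCanonical_eq (n : String) :
    pvCanonical n = pvChain (PySem.Str.replace (PySem.Str.upper n) " " "") := rfl

def pvAllNames : List String :=
  ["ML", "MONEYLINE", "MONEY", "SPREAD", "HANDICAP", "ASIANHANDICAP",
   "TOTAL", "TOTALS", "OVER/UNDER", "OU"]

-- A's group scan written out as a boolean formula over name comparisons
lemma loop_char (x y : String) :
    pvAliasLoop x y pvAliases =
      (((x == "ML" || x == "MONEYLINE" || x == "MONEY") &&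
        (y == "ML" || y == "MONEYLINE" || y == "MONEY")) ||
       ((x == "SPREAD" || x == "HANDICAP" || x == "ASIANHANDICAP") &&
        (y == "SPREAD" || y == "HANDICAP" || y == "ASIANHANDICAP")) ||
       ((x == "TOTAL" || x == "TOTALS" || x == "OVER/UNDER" || x == "OU") &&
        (y == "TOTAL" || y == "TOTALS" || y == "OVER/UNDER" || y == "OU"))) := by
  simp only [pvAliases, pvAliasLoop, List.contains_cons, List.contains_nil, Bool.or_false]
  cases hx1 : x == "ML" <;> cases hx2 : x == "MONEYLINE" <;> cases hx3 : x == "MONEY" <;>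
    simp_all <;> (rw [Bool.eq_iff_iff]; simp; tauto)

-- core: A's body on normalised strings equals comparing the rewrite chains
set_option maxHeartbeats 2000000 in
lemma pv_core (x y : String) :
    (if x == y then true else pvAliasLoop x y pvAliases) = (pvChain x == pvChain y) := by
  rw [loop_char]
  by_cases hx : x ∈ pvAllNames
  · by_cases hy : y ∈ pvAllNames
    · simp only [pvAllNames, List.mem_cons, List.not_mem_nil, or_false] at hx hy
      rcases hx with rfl | rfl | rfl | rfl | rfl | rfl | rfl | rfl | rfl | rfl <;>
        rcases hy with rfl | rfl | rfl | rfl | rfl | rfl | rfl | rfl | rfl | rfl <;> decide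
    · simp only [pvAllNames, List.mem_cons, List.not_mem_nil, or_false, not_or] at hy
      obtain ⟨g1, g2, g3, g4, g5, g6, g7, g8, g9, g10⟩ := hy
      simp only [pvAllNames, List.mem_cons, List.not_mem_nil, or_false] at hx
      rcases hx with rfl | rfl | rfl | rfl | rfl | rfl | rfl | rfl | rfl | rfl <;>
        (rw [Bool.eq_iff_iff]; simp [pvChain, g1, g2, g3, g4, g5, g6, g7, g8, g9, g10,
          Ne.symm g1, Ne.symm g2, Ne.symm g3, Ne.symm g4, Ne.symm g5, Ne.symm g6, Ne.symm g7,
          Ne.symm g8, Ne.symm g9, Ne.symm g10])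
  · by_cases hy : y ∈ pvAllNames
    · simp only [pvAllNames, List.mem_cons, List.not_mem_nil, or_false, not_or] at hx
      obtain ⟨h1, h2, h3, h4, h5, h6, h7, h8, h9, h10⟩ := hx
      simp only [pvAllNames, List.mem_cons, List.not_mem_nil, or_false] at hy
      rcases hy with rfl | rfl | rfl | rfl | rfl | rfl | rfl | rfl | rfl | rfl <;>
        (rw [Bool.eq_iff_iff]; simp [pvChain, h1, h2, h3, h4, h5, h6, h7, h8, h9, h10])
    · simp only [pvAllNames, List.mem_cons, List.not_mem_nil, or_false, not_or] at hx hy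
      obtain ⟨h1, h2, h3, h4, h5, h6, h7, h8, h9, h10⟩ := hx
      obtain ⟨g1, g2, g3, g4, g5, g6, g7, g8, g9, g10⟩ := hy
      rw [Bool.eq_iff_iff]
      simp [pvChain, h1, h2, h3, h4, h5, h6, h7, h8, h9, h10,
        g1, g2, g3, g4, g5, g6, g7, g8, g9, g10]

-- ===== VERDICT (by name: the statement is the Claim_ definition above) =====
theorem market_names_match_py_spec : Claim_equal_market_names_match_py := by
  intro a b _
  unfold Spec_market_names_match_py market_names_match_py market_names_match_py_alt
  rw [pvCanonical_eq, pvCanonical_eq]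
  exact pv_core _ _
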